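-- pv_equiv track=rewrite | github.com/mileoa/algoAndDataStructures3 | KnuthSequence/KnuthSequence.py | KnuthSequence
-- ===== SOURCE A (Python) =====
-- from typing import List
--
-- def KnuthSequence(array_size: int) -> List[int]:
--     if array_size == 0:
--         return []
--     if array_size == 1:
--         return [1]
--     sequence: List[int] = []
--     n = 1
--     while array_size > n:
--         sequence.append(n)
--         n = n * 3 + 1
--     sequence.reverse()
--     return sequence
-- ===== SOURCE B (Python) =====
-- from typing import List
--
-- def KnuthSequence(array_size: int) -> List[int]:
--     if array_size <= 0:
--         return []
--     k = 1
--     while (3 ** (k + 1) - 1) // 2 < array_size: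
--         k += 1
--     return [(3 ** i - 1) // 2 for i in range(k, 0, -1)]
-- ===== Notes on version B (the rewrite author's own statement) =====
-- stated objective: simpler
-- what changed: Replaces A's append-then-reverse accumulator loop by first finding the number of terms and then emitting each Knuth increment directly from its closed form in powers of three, in descending order via a comprehension, with no list mutation or final reverse.
import Mathlib
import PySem

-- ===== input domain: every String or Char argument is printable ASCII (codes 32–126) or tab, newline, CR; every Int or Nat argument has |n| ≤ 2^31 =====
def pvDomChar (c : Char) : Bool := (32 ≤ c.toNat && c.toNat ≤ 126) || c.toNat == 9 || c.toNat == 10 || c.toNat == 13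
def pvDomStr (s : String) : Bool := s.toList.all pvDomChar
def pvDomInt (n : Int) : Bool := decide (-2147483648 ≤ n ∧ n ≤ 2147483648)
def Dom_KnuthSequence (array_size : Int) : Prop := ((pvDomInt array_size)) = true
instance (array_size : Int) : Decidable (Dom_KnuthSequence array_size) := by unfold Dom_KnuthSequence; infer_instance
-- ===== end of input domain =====

-- B replaces A's append-then-reverse accumulator loop by a closed form: it finds the
-- number of terms k and emits each Knuth increment (3^i - 1) // 2 directly in
-- descending order (objective: simpler/alternative, not claimed faster).

-- ===== PORT A =====
-- while loop of A; fuel = array_size.toNat always suffices since after j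
-- iterations n ≥ j + 1 (fuel 0 ⇒ loop condition is false anyway on the calls made)
def KnuthLoopA (fuel : Nat) (array_size : Int) (n : Int) (sequence : List Int) : List Int :=
  match fuel with
  | 0 => sequence.reverse
  | fuel + 1 =>
    if array_size > n then KnuthLoopA fuel array_size (n * 3 + 1) (sequence ++ [n])
    else sequence.reverse

def KnuthSequence (array_size : Int) : List Int :=
  if array_size = 0 then []
  else if array_size = 1 then [1]
  else KnuthLoopA array_size.toNat array_size 1 []

-- ===== PORT B =====
-- the k-search loop of Source B; fuel = array_size.toNat always suffices (see LoopA note)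
def KnuthFindK (fuel : Nat) (array_size : Int) (k : Nat) : Nat :=
  match fuel with
  | 0 => k
  | fuel + 1 =>
    if PySem.Int.floordiv ((3 : Int) ^ (k + 1) - 1) 2 < array_size then
      KnuthFindK fuel array_size (k + 1)
    else k

def KnuthSequence_alt (array_size : Int) : List Int :=
  if array_size ≤ 0 then []
  else
    (PySem.List.pyRange (KnuthFindK array_size.toNat array_size 1) 0 (-1)).map
      (fun i => PySem.Int.floordiv ((3 : Int) ^ i.toNat - 1) 2)

-- ===== PRECONDITION & SPEC =====
def Spec_KnuthSequence (array_size : Int) (out : List Int) : Prop := out = KnuthSequence_alt array_size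
instance (array_size : Int) (out : List Int) : Decidable (Spec_KnuthSequence array_size out) := by unfold Spec_KnuthSequence; infer_instance

-- ===== CLAIM (what is proved, stated in full; the proofs are below) =====
def Claim_equal_KnuthSequence : Prop := ∀ (array_size : Int), Dom_KnuthSequence array_size → Spec_KnuthSequence array_size (KnuthSequence array_size)

-- ===== LEMMAS AND PROOFS =====

-- T k = (3^k - 1)/2, the k-th Knuth increment, by its recurrence
def KT : Nat → Int
  | 0 => 0
  | k + 1 => 3 * KT k + 1

theorem KT_two_mul (k : Nat) : (3 : Int) ^ k - 1 = 2 * KT k := by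
  induction k with
  | zero => simp [KT]
  | succ k ih => rw [pow_succ, KT]; linarith

theorem KT_floordiv (k : Nat) : PySem.Int.floordiv ((3 : Int) ^ k - 1) 2 = KT k := by
  rw [KT_two_mul, PySem.Int.floordiv_eq_ediv_of_pos (by norm_num : (0:Int) < 2)]
  omega

theorem KT_ge (k : Nat) : (k : Int) ≤ KT k := by
  induction k with
  | zero => simp [KT]
  | succ k ih => rw [KT]; push_cast; linarith

theorem KT_nonneg (k : Nat) : 0 ≤ KT k := le_trans (by exact_mod_cast Nat.zero_le k) (KT_ge k)

theorem KT_lt_succ (k : Nat) : KT k < KT (k + 1) := by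
  have := KT_nonneg k; rw [KT]; linarith

theorem KT_mono : StrictMono KT := strictMono_nat_of_lt_succ KT_lt_succ

-- characterisation of KnuthFindK
theorem findK_ge (fuel : Nat) (ars : Int) (k : Nat) : k ≤ KnuthFindK fuel ars k := by
  induction fuel generalizing k with
  | zero => simp [KnuthFindK]
  | succ fuel ih =>
    simp only [KnuthFindK]
    split
    · exact le_trans (Nat.le_succ k) (ih (k + 1))
    · exact le_refl k

theorem findK_lt (fuel : Nat) (ars : Int) (k : Nat) (h : KT k < ars) :
    KT (KnuthFindK fuel ars k) < ars := by
  induction fuel generalizing k with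
  | zero => simpa [KnuthFindK]
  | succ fuel ih =>
    simp only [KnuthFindK, KT_floordiv]
    split
    · exact ih (k + 1) (by assumption)
    · exact h

theorem findK_stop (fuel : Nat) (ars : Int) (k : Nat) (hf : ars ≤ (k : Int) + fuel) :
    ars ≤ KT (KnuthFindK fuel ars k + 1) := by
  induction fuel generalizing k with
  | zero =>
    simp only [KnuthFindK]
    calc ars ≤ (k : Int) + 0 := hf
    _ ≤ ((k + 1 : Nat) : Int) := by push_cast; omega
    _ ≤ KT (k + 1) := KT_ge _
  | succ fuel ih =>
    simp only [KnuthFindK, KT_floordiv]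
    split
    · exact ih (k + 1) (by push_cast at hf ⊢; omega)
    · omega

-- A's loop, entered with n = KT (j+1), produces the increments KT (j+1) … KT K
-- (reversed), where K is any index with KT K < ars ≤ KT (K+1) and j ≤ K.
theorem loopA_spec (fuel : Nat) (ars : Int) (j K : Nat) (acc : List Int)
    (hfuel : ars ≤ (j : Int) + 1 + fuel)
    (hjK : j ≤ K) (hK : KT K < ars) (hK1 : ars ≤ KT (K + 1)) :
    KnuthLoopA fuel ars (KT (j + 1)) acc
      = (acc ++ (List.range' (j + 1) (K - j)).map KT).reverse := by
  induction fuel generalizing j acc with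
  | zero =>
    have hjeq : j = K := by
      by_contra hne
      have hjlt : j + 1 ≤ K := Nat.succ_le_of_lt (lt_of_le_of_ne hjK hne)
      have h1 : KT (j + 1) ≤ KT K := KT_mono.monotone hjlt
      have h2 := KT_ge (j + 1)
      push_cast at h2 hfuel
      omega
    subst hjeq
    simp [KnuthLoopA]
  | succ fuel ih =>
    simp only [KnuthLoopA]
    by_cases hcase : j = K
    · subst hcase
      have hnot : ¬ ars > KT (j + 1) := by omega
      simp [hnot]
    · have hjlt : j + 1 ≤ K := Nat.succ_le_of_lt (lt_of_le_of_ne hjK hcase)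
      have hgt : ars > KT (j + 1) :=
        lt_of_le_of_lt (KT_mono.monotone hjlt) hK
      rw [if_pos hgt]
      have hn : KT (j + 1) * 3 + 1 = KT (j + 1 + 1) := by
        conv_rhs => rw [KT]
        ring
      rw [hn, ih (j + 1) (acc ++ [KT (j + 1)]) (by push_cast at hfuel ⊢; omega) hjlt]
      have hrange : List.range' (j + 1) (K - j) = (j + 1) :: List.range' (j + 2) (K - (j + 1)) := by
        have : K - j = (K - (j + 1)) + 1 := by omega
        rw [this, List.range'_succ]
      rw [hrange]
      simp

-- the countdown range [K, K-1, …, 1] is the reverse of range' 1 K, mapped to Int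
theorem pyRange_countdown (K : Nat) :
    PySem.List.pyRange (K : Int) 0 (-1) = ((List.range' 1 K).map (fun i : Nat => (i : Int))).reverse := by
  induction K with
  | zero => simp [PySem.List.pyRange_neg_one_eq_nil]
  | succ K ih =>
    rw [show ((K + 1 : Nat) : Int) = (K : Int) + 1 by push_cast; ring]
    rw [PySem.List.pyRange_neg_one_cons (by positivity : (0:Int) < (K:Int) + 1)]
    rw [show (K : Int) + 1 - 1 = (K : Int) by ring, ih]
    rw [List.range'_1_concat]
    simp
    omega

theorem KnuthSequence_eq_of_ge_two (ars : Int) (h2 : 2 ≤ ars) :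
    KnuthSequence ars = KnuthSequence_alt ars := by
  have h0 : ¬ ars = 0 := by omega
  have h1 : ¬ ars = 1 := by omega
  have hle : ¬ ars ≤ 0 := by omega
  set K := KnuthFindK ars.toNat ars 1 with hKdef
  have hK1le : 1 ≤ K := findK_ge _ _ _
  have hKlt : KT K < ars := findK_lt _ _ _ (by simp [KT]; omega)
  have hKstop : ars ≤ KT (K + 1) := findK_stop _ _ _ (by omega)
  rw [KnuthSequence, if_neg h0, if_neg h1, KnuthSequence_alt, if_neg hle, ← hKdef]
  have hloop := loopA_spec ars.toNat ars 0 K [] (by omega) (Nat.zero_le K) hKlt hKstop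
  rw [show KT (0 + 1) = (1 : Int) by simp [KT]] at hloop
  rw [hloop, pyRange_countdown K, List.map_reverse, List.map_map]
  simp only [Nat.sub_zero, Nat.zero_add, List.nil_append]
  congr 1
  symm
  apply List.map_congr_left
  intro i _
  simp only [Function.comp_apply, Int.toNat_natCast]
  exact KT_floordiv i

-- ===== VERDICT (by name: the statement is the Claim_ definition above) =====
theorem KnuthSequence_spec : Claim_equal_KnuthSequence := by
  intro ars _
  unfold Spec_KnuthSequence
  by_cases hneg : ars ≤ 0
  · have hA : KnuthSequence ars = [] := by
      by_cases h0 : ars = 0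
      · simp [KnuthSequence, h0]
      · have : ars.toNat = 0 := by omega
        simp [KnuthSequence, h0, this, show ¬ ars = 1 by omega, KnuthLoopA]
    have hB : KnuthSequence_alt ars = [] := by simp [KnuthSequence_alt, hneg]
    rw [hA, hB]
  · by_cases h1 : ars = 1
    · subst h1; decide
    · exact KnuthSequence_eq_of_ge_two ars (by omega)
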